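-- pv_equiv track=rewrite | github.com/AIWesty/training_algorithms | linear_search/video_ex.py | shortword
-- ===== SOURCE A (Python) =====
-- def shortword(seq):
--     minlen = len(seq[0])
--     for word in seq:
--         if len(word) < minlen:
--             minlen = len(word)
--     ans = ''
--     for word in seq:
--         if len(word) == minlen:
--             ans += word + ' '
--     return ans
-- ===== SOURCE B (Python) =====
-- def shortword(seq):
--     best = None
--     bucket = []
--     for word in seq:
--         l = len(word)
--         if best is None or l < best:
--             best = l
--             bucket = [word]
--         elif l == best:
--             bucket.append(word)
--     return ''.join(w + ' ' for w in bucket)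
-- ===== Notes on version B (the rewrite author's own statement) =====
-- stated objective: alternative
-- what changed: B makes a single pass keeping the current minimum length and the running bucket of minimal words (resetting the bucket when a shorter word appears) and joins the bucket once at the end, instead of A's two passes (one to find the minimum, one to concatenate with +=).
-- crash fix: On the empty list A raises IndexError (it evaluates len(seq[0])); B naturally returns ''. — e.g. on shortword([]): A raises IndexError, B returns ""
import Mathlib
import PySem

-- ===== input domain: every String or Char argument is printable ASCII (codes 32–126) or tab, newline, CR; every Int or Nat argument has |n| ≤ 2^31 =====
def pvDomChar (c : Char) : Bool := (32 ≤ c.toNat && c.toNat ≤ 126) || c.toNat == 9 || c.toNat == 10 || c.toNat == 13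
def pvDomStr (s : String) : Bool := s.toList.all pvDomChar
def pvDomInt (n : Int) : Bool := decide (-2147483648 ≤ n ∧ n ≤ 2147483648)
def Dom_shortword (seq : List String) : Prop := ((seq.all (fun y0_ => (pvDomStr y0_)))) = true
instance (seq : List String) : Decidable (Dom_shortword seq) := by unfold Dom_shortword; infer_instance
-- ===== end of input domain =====

-- B changes the algorithm: one pass with a running minimum and bucket instead of A's two passes; same return value on nonempty input.

-- ===== PORT A =====
-- literal port of A: minlen = len(seq[0]); two loops; ans built by string concatenation
-- (string concatenation is ported on List Char, wrapped with String.ofList — exact for the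
-- Python string values; PySem.Str.len is len(word))
def pvMinlenA (seq : List String) : Int :=
  seq.foldl (fun m w => if PySem.Str.len w < m then PySem.Str.len w else m)
    (PySem.Str.len ((PySem.List.pyGet? seq 0).getD ""))

def shortword (seq : List String) : String :=
  String.ofList (seq.foldl
    (fun a w => if PySem.Str.len w == pvMinlenA seq then a ++ w.toList ++ [' '] else a)
    ([] : List Char))

-- ===== PORT B =====
-- one loop step of Source B: (best, bucket) updated per word
def pvStepB (st : Option Int × List String) (w : String) : Option Int × List String :=
  let l := PySem.Str.len w
  match st with
  | (none, _) => (some l, [w])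
  | (some b, bucket) =>
      if l < b then (some l, [w])
      else if l == b then (some b, bucket ++ [w])
      else (some b, bucket)

def shortword_alt (seq : List String) : String :=
  let st := seq.foldl pvStepB (none, [])
  String.ofList (PySem.Chars.join [] (st.2.map (fun w => w.toList ++ [' '])))

-- ===== PRECONDITION & SPEC =====
-- Pre_ excludes only the empty list, on which A raises IndexError (seq[0]).
def Pre_shortword (seq : List String) : Prop := seq ≠ []
instance (seq : List String) : Decidable (Pre_shortword seq) := by unfold Pre_shortword; infer_instance
def pvWitness_shortword : List String := ["ab", "c", "de"]

-- On the empty list A raises IndexError (it evaluates len(seq[0])); B naturally returns ''.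
def Raises_shortword (seq : List String) : Prop := seq = []
instance (seq : List String) : Decidable (Raises_shortword seq) := by unfold Raises_shortword; infer_instance
def pvRaiseWitness_shortword : List String := []
def pvRaiseWitnessOut_shortword : String := ""

def Spec_shortword (seq : List String) (out : String) : Prop := out = shortword_alt seq
instance (seq : List String) (out : String) : Decidable (Spec_shortword seq out) := by unfold Spec_shortword; infer_instance

-- ===== CLAIM (what is proved, stated in full; the proofs are below) =====
def Claim_equal_shortword : Prop := ∀ (seq : List String), Dom_shortword seq → Pre_shortword seq → Spec_shortword seq (shortword seq)
def Claim_raises_shortword : Prop := (∀ (seq : List String), Dom_shortword seq → Raises_shortword seq → ¬ Pre_shortword seq) ∧ (Dom_shortword (pvRaiseWitness_shortword) ∧ Raises_shortword (pvRaiseWitness_shortword) ∧ shortword_alt (pvRaiseWitness_shortword) = pvRaiseWitnessOut_shortword)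

-- ===== LEMMAS AND PROOFS =====

-- A's running-minimum fold
def pvFmin (l : List String) (m : Int) : Int :=
  l.foldl (fun m w => if PySem.Str.len w < m then PySem.Str.len w else m) m

lemma pvFmin_le (l : List String) (m : Int) : pvFmin l m ≤ m := by
  induction l generalizing m with
  | nil => simp [pvFmin]
  | cons w t ih =>
      simp only [pvFmin, List.foldl_cons]
      split
      · exact le_trans (ih _) (by omega)
      · exact ih m

-- B's fold from a live state: final best is the running minimum, final bucket is the
-- minimal words (prefix bucket kept only when the minimum does not drop).
lemma pvStepB_inv (l : List String) (m : Int) (b : List String) :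
    l.foldl pvStepB (some m, b) =
      (some (pvFmin l m),
       (if pvFmin l m = m then b else []) ++ l.filter (fun w => PySem.Str.len w == pvFmin l m)) := by
  induction l generalizing m b with
  | nil => simp [pvFmin]
  | cons w t ih =>
      simp only [List.foldl_cons, pvStepB]
      by_cases hlt : PySem.Str.len w < m
      · simp only [if_pos hlt]
        have hm : pvFmin (w :: t) m = pvFmin t (PySem.Str.len w) := by
          unfold pvFmin; rw [List.foldl_cons, if_pos hlt]
        have hle' : pvFmin t (PySem.Str.len w) ≤ PySem.Str.len w := pvFmin_le _ _
        have hFm : ¬ pvFmin (w :: t) m = m := by rw [hm]; omega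
        rw [ih, hm, if_neg (by omega : ¬ pvFmin t (PySem.Str.len w) = m), List.nil_append,
          List.filter_cons]
        by_cases he : pvFmin t (PySem.Str.len w) = PySem.Str.len w
        · have hbe : (PySem.Str.len w == pvFmin t (PySem.Str.len w)) = true := beq_iff_eq.mpr he.symm
          rw [if_pos he, if_pos hbe, List.singleton_append]
        · have hbe : ¬ (PySem.Str.len w == pvFmin t (PySem.Str.len w)) = true := by
            simp only [beq_iff_eq]; exact fun hc => he hc.symm
          rw [if_neg he, if_neg hbe, List.nil_append]
      · simp only [if_neg hlt]
        have hm : pvFmin (w :: t) m = pvFmin t m := by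
          unfold pvFmin; rw [List.foldl_cons, if_neg hlt]
        have hle' : pvFmin t m ≤ m := pvFmin_le _ _
        by_cases heq : (PySem.Str.len w == m) = true
        · have heq' : PySem.Str.len w = m := by simpa using heq
          rw [if_pos heq, ih, hm, List.filter_cons]
          by_cases hfm : pvFmin t m = m
          · have hbe : (PySem.Str.len w == pvFmin t m) = true := beq_iff_eq.mpr (by omega)
            rw [if_pos hfm, if_pos hfm, if_pos hbe]
            simp
          · have hbe : ¬ (PySem.Str.len w == pvFmin t m) = true := by
              simp only [beq_iff_eq]; omega
            rw [if_neg hfm, if_neg hfm, if_neg hbe, List.nil_append]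
        · have hgt : m < PySem.Str.len w := by
            have : ¬ PySem.Str.len w = m := by simpa using heq
            omega
          have hbe : ¬ (PySem.Str.len w == pvFmin t m) = true := by
            simp only [beq_iff_eq]; omega
          rw [if_neg heq, ih, hm, List.filter_cons, if_neg hbe]

-- A's second loop is the concatenation of the filtered words
lemma pvFoldA (M : Int) (l : List String) (a : List Char) :
    l.foldl (fun a w => if PySem.Str.len w == M then a ++ w.toList ++ [' '] else a) a =
      a ++ (l.filter (fun w => PySem.Str.len w == M)).flatMap (fun w => w.toList ++ [' ']) := by
  induction l generalizing a with
  | nil => simp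
  | cons w t ih =>
      simp only [List.foldl_cons, List.filter_cons]
      by_cases h : (PySem.Str.len w == M) = true
      · rw [if_pos h, if_pos h, ih, List.flatMap_cons]
        simp [List.append_assoc]
      · rw [if_neg h, if_neg h, ih]

-- ''.join is flatten
lemma pvJoinNil (l : List (List Char)) : PySem.Chars.join [] l = l.flatten := by
  induction l with
  | nil => simp [PySem.Chars.join, List.intercalate]
  | cons x t ih =>
      cases t with
      | nil => simp [PySem.Chars.join, List.intercalate]
      | cons y u =>
          rw [PySem.Chars.join_cons_cons, ih]
          simp

-- ===== VERDICT (by name: the statement is the Claim_ definition above) =====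
theorem shortword_spec : Claim_equal_shortword := by
  intro seq _ hpre
  unfold Spec_shortword
  match seq with
  | [] => exact absurd rfl hpre
  | h :: t =>
      have h0 : (PySem.List.pyGet? (h :: t) 0).getD "" = h := by
        simp [PySem.List.pyGet?, PySem.List.pyIdx?]
      have hM : pvMinlenA (h :: t) = pvFmin t (PySem.Str.len h) := by
        unfold pvMinlenA pvFmin
        rw [h0, List.foldl_cons, if_neg (lt_irrefl _)]
      unfold shortword shortword_alt
      rw [hM, pvFoldA]
      simp only [List.foldl_cons, pvStepB]
      rw [pvStepB_inv, pvJoinNil]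
      congr 1
      rw [List.filter_cons, List.flatMap_def]
      by_cases he : pvFmin t (PySem.Str.len h) = PySem.Str.len h
      · have hbe : (PySem.Str.len h == pvFmin t (PySem.Str.len h)) = true := beq_iff_eq.mpr he.symm
        rw [if_pos hbe, if_pos he, List.singleton_append]
        simp
      · have hbe : ¬ (PySem.Str.len h == pvFmin t (PySem.Str.len h)) = true := by
          simp only [beq_iff_eq]; exact fun hc => he hc.symm
        rw [if_neg hbe, if_neg he, List.nil_append]
        simp

@[simp]
theorem shortword_raises : Claim_raises_shortword := by
  unfold Claim_raises_shortword
  exact ⟨fun seq _ hr hp => hp hr, by decide⟩
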